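-- pv_equiv track=rewrite | github.com/PavleSarenac/Cryptography | k2/predavanja/01_diffie_hellman.py | miller_rabin_get_k_and_q
-- ===== SOURCE A (Python) =====
-- def miller_rabin_get_k_and_q(decremented_number):
--     k = 0
--     current_number = decremented_number
--     while current_number % 2 == 0:
--         current_number //= 2
--         k += 1
--     q = decremented_number // pow(2, k)
--     return k, q
-- ===== SOURCE B (Python) =====
-- def miller_rabin_get_k_and_q(decremented_number):
--     # closed form: k = number of trailing zero bits, q = odd part (arithmetic shift)
--     k = (decremented_number & -decremented_number).bit_length() - 1
--     return k, decremented_number >> k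
-- ===== Notes on version B (the rewrite author's own statement) =====
-- stated objective: idiomatic
-- what changed: Replaces the repeated-division-by-2 while loop with a closed-form bit trick: the lowest set bit (n & -n) gives k via bit_length, and q is an arithmetic right shift.
-- outside the precondition, e.g. on miller_rabin_get_k_and_q(0): A does not finish within the time limit, B raises ValueError
import Mathlib
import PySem

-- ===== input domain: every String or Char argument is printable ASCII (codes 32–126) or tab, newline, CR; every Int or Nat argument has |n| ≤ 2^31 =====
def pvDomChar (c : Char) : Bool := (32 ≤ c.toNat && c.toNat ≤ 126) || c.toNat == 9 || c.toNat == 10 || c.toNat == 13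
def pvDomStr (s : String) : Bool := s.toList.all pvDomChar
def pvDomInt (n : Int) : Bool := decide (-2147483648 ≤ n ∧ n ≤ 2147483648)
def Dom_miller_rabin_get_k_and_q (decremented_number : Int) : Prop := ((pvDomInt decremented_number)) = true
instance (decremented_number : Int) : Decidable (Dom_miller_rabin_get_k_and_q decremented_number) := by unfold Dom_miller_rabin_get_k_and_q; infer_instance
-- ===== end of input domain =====

-- B replaces A's divide-by-2 counting loop with a closed-form bit trick (lowest set bit + bit_length); Pre_ excludes 0, where A loops forever and B raises ValueError.


-- ===== PORT A =====
-- the while loop; 'cur ≠ 0' is only a totality guard (on cur = 0 the Python loop never terminates, excluded by Pre_)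
def mrLoopA (cur : Int) (k : Int) : Int :=
  if h : cur ≠ 0 ∧ PySem.Int.mod cur 2 = 0 then
    mrLoopA (PySem.Int.floordiv cur 2) (k + 1)
  else k
termination_by cur.natAbs
decreasing_by
  rw [PySem.Int.floordiv_eq_ediv_of_pos (by omega : (0:Int) < 2)]
  have := PySem.Int.mod_eq_emod_of_pos (a := cur) (b := 2) (by omega)
  omega

def miller_rabin_get_k_and_q (decremented_number : Int) : Int × Int :=
  let k := mrLoopA decremented_number 0
  -- pow(2, k) with k ≥ 0 always (k counts loop iterations), so k.toNat is exact
  (k, PySem.Int.floordiv decremented_number ((2 : Int) ^ k.toNat))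

-- ===== PORT B =====
def miller_rabin_get_k_and_q_alt (decremented_number : Int) : Int × Int :=
  -- (n & -n).bit_length() - 1
  let k : Int := (PySem.Int.bitLength (PySem.Int.band decremented_number (-decremented_number)) : Int) - 1
  -- n >> k : Python raises on a negative shift count, which happens only for n = 0 (outside Pre_); k ≥ 0 otherwise, so k.toNat is exact
  (k, decremented_number >>> k.toNat)

-- ===== PRECONDITION & SPEC =====
-- Pre_ excludes exactly 0: there A's while loop never terminates (no return), and B raises ValueError (negative shift count).
def Pre_miller_rabin_get_k_and_q (decremented_number : Int) : Prop := decremented_number ≠ 0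
instance (decremented_number : Int) : Decidable (Pre_miller_rabin_get_k_and_q decremented_number) := by unfold Pre_miller_rabin_get_k_and_q; infer_instance
def pvWitness_miller_rabin_get_k_and_q : Int := 12

def Spec_miller_rabin_get_k_and_q (decremented_number : Int) (out : Int × Int) : Prop := out = miller_rabin_get_k_and_q_alt decremented_number
instance (decremented_number : Int) (out : Int × Int) : Decidable (Spec_miller_rabin_get_k_and_q decremented_number out) := by unfold Spec_miller_rabin_get_k_and_q; infer_instance

-- ===== CLAIM (what is proved, stated in full; the proofs are below) =====
def Claim_equal_miller_rabin_get_k_and_q : Prop := ∀ (decremented_number : Int), Dom_miller_rabin_get_k_and_q decremented_number → Pre_miller_rabin_get_k_and_q decremented_number → Spec_miller_rabin_get_k_and_q decremented_number (miller_rabin_get_k_and_q decremented_number)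

-- ===== LEMMAS AND PROOFS =====

-- trailing-zero count of a positive natural number
def tzN (m : Nat) : Nat :=
  if h : m ≠ 0 ∧ m % 2 = 0 then tzN (m / 2) + 1 else 0
termination_by m
decreasing_by omega

theorem tzN_odd {m : Nat} (h : m % 2 = 1) : tzN m = 0 := by
  rw [tzN, dif_neg (by omega)]

theorem tzN_even {m : Nat} (h0 : m ≠ 0) (h2 : m % 2 = 0) : tzN m = tzN (m / 2) + 1 := by
  rw [tzN]; simp [h0, h2]

-- n &&& (n-1) clears the lowest set bit: the difference is 2 ^ (trailing zeros)
theorem lowbit (m : Nat) (hm : m ≠ 0) : m - (m &&& (m - 1)) = 2 ^ tzN m := by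
  induction m using Nat.strong_induction_on with
  | _ m ih =>
    rcases Nat.even_or_odd m with he | ho
    · -- m = 2*a with a ≠ 0
      obtain ⟨a, ha⟩ := he
      have ha0 : a ≠ 0 := by omega
      have hb : m = Nat.bit false a := by simp [Nat.bit]; omega
      have hb1 : m - 1 = Nat.bit true (a - 1) := by simp [Nat.bit]; omega
      have hand : m &&& (m - 1) = 2 * (a &&& (a - 1)) := by
        rw [hb1, hb, Nat.land_bit]; simp [Nat.bit]
      have hle : a &&& (a - 1) ≤ a := Nat.and_le_left
      have ihx := ih a (by omega) ha0
      have htz : tzN m = tzN a + 1 := by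
        rw [tzN_even hm (by omega)]
        congr 1; congr 1; omega
      rw [hand, htz, pow_succ]
      omega
    · -- m odd: m &&& (m-1) = m - 1
      obtain ⟨a, ha⟩ := ho
      have hb : m = Nat.bit true a := by simp [Nat.bit]; omega
      have hb1 : m - 1 = Nat.bit false a := by simp [Nat.bit]; omega
      have hand : m &&& (m - 1) = m - 1 := by
        rw [hb1, hb, Nat.land_bit]; simp [Nat.bit, Nat.and_self]
      rw [hand, tzN_odd (by omega)]
      omega

-- Python's n & -n, for n ≠ 0, equals natAbs - (natAbs &&& (natAbs - 1))
theorem band_neg_eq (n : Int) (hn : n ≠ 0) :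
    PySem.Int.band n (-n) = ((n.natAbs - (n.natAbs &&& (n.natAbs - 1)) : Nat) : Int) := by
  unfold PySem.Int.band
  rcases lt_trichotomy n 0 with h | h | h
  · have h1 : ¬ (0 ≤ n) := by omega
    have h2 : (0 : Int) ≤ -n := by omega
    simp only [h1, h2, if_true, if_false]
    rw [show (-n).toNat = n.natAbs by omega, show (-n - 1).toNat = n.natAbs - 1 by omega]
  · omega
  · have h1 : (0 : Int) ≤ n := by omega
    have h2 : ¬ ((0:Int) ≤ -n) := by omega
    simp only [h1, h2, if_true, if_false, neg_neg]
    rw [show n.toNat = n.natAbs by omega, show (n - 1).toNat = n.natAbs - 1 by omega]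

theorem band_neg_pow (n : Int) (hn : n ≠ 0) :
    PySem.Int.band n (-n) = ((2 ^ tzN n.natAbs : Nat) : Int) := by
  rw [band_neg_eq n hn, lowbit n.natAbs (by omega)]

theorem bitLength_two_pow (j : Nat) : PySem.Int.bitLength ((2 ^ j : Nat) : Int) = j + 1 := by
  induction j with
  | zero => decide
  | succ j ih =>
    rw [PySem.Int.bitLength_natCast (by positivity)]
    have : 2 ^ (j + 1) / 2 = 2 ^ j := by omega
    rw [this, ih]

-- A's loop counts trailing zeros
theorem mrLoopA_eq (m : Nat) : ∀ (n : Int), n ≠ 0 → n.natAbs = m → ∀ (k : Int),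
    mrLoopA n k = k + (tzN m : Int) := by
  induction m using Nat.strong_induction_on with
  | _ m ih =>
    intro n hn hm k
    rw [mrLoopA]
    have hmod := PySem.Int.mod_eq_emod_of_pos (a := n) (b := 2) (by omega)
    by_cases he : PySem.Int.mod n 2 = 0
    · have hme : m % 2 = 0 := by omega
      have hm0 : m ≠ 0 := by omega
      rw [dif_pos ⟨hn, he⟩]
      rw [PySem.Int.floordiv_eq_ediv_of_pos (by omega : (0:Int) < 2)]
      rw [ih (m / 2) (by omega) (n / 2) (by omega) (by omega) (k + 1)]
      rw [tzN_even hm0 hme]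
      push_cast
      ring
    · have hmo : m % 2 = 1 := by omega
      rw [dif_neg (by tauto)]
      rw [tzN_odd hmo]
      simp

theorem miller_rabin_get_k_and_q_eq (n : Int) (hn : n ≠ 0) :
    miller_rabin_get_k_and_q n = miller_rabin_get_k_and_q_alt n := by
  unfold miller_rabin_get_k_and_q miller_rabin_get_k_and_q_alt
  have hk : mrLoopA n 0 = (tzN n.natAbs : Int) := by
    rw [mrLoopA_eq n.natAbs n hn rfl 0]; ring
  have hb : (PySem.Int.bitLength (PySem.Int.band n (-n)) : Int) - 1 = (tzN n.natAbs : Int) := by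
    rw [band_neg_pow n hn, bitLength_two_pow]
    push_cast; ring
  simp only [hk, hb]
  rw [Prod.mk.injEq]
  refine ⟨rfl, ?_⟩
  rw [Int.shiftRight_eq_div_pow, PySem.Int.floordiv_eq_ediv_of_pos (by positivity)]
  push_cast
  rfl

-- ===== VERDICT (by name: the statement is the Claim_ definition above) =====
theorem miller_rabin_get_k_and_q_spec : Claim_equal_miller_rabin_get_k_and_q := by
  intro n _ hpre
  unfold Spec_miller_rabin_get_k_and_q
  exact miller_rabin_get_k_and_q_eq n hpre
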